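-- pv_equiv track=rewrite | github.com/MrBrantCode/unitest_baseline | mut_generate/mist_train_cf/cf_101019/solution.py | countPairsWithKXor
-- ===== SOURCE A (Python) =====
-- def countPairsWithKXor(arr, n, k):
--     freq = {}
--     ans = 0
--
--     for i in range(n):
--         count = 0
--         num = arr[i] ^ k
--         while num > 0:
--             count += num & 1
--             num >>= 1
--
--         if count in freq:
--             ans += freq[count]
--
--         if count not in freq:
--             freq[count] = 0
--         freq[count] += 1
--
--     return ans
-- ===== SOURCE B (Python) =====
-- def countPairsWithKXor(arr, n, k):
--     # Sort the popcounts, then count pairs run by run with two pointers.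
--     def popcount(v):
--         c = 0
--         while v > 0:
--             c += v & 1
--             v >>= 1
--         return c
--
--     ps = sorted(popcount(arr[i] ^ k) for i in range(n))
--
--     def pairs(s):
--         if not s:
--             return 0
--         x = s[0]
--         f = 1
--         while f < len(s) and s[f] == x:
--             f += 1
--         return f * (f - 1) // 2 + pairs(s[f:])
--
--     return pairs(ps)
-- ===== Notes on version B (the rewrite author's own statement) =====
-- stated objective: alternative
-- what changed: A makes a single hash-map pass accumulating ans += freq[count] before each frequency update; B uses no dictionary: it sorts the popcounts and counts pairs by run-length grouping over the sorted list (recursing run by run, adding f*(f-1)//2 per run).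
import Mathlib
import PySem

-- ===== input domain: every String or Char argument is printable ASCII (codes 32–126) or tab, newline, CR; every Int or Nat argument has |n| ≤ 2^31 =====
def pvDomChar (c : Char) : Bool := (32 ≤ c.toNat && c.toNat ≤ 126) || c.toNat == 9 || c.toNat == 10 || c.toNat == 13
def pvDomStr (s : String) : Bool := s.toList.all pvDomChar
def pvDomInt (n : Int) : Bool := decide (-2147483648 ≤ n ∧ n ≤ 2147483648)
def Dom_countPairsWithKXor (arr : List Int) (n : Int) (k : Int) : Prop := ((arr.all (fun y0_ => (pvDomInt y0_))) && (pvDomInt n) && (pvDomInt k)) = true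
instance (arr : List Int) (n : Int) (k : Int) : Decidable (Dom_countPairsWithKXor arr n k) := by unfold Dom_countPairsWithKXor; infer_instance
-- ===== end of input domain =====

-- B drops A's running dictionary entirely: it sorts the popcounts and counts pairs by
-- run-length grouping over the sorted list (an alternative algorithm, not faster).

-- shared helper: both Pythons contain the identical 'while num > 0: count += num & 1; num >>= 1' loop
lemma pcLoop_dec (num : Int) (h : 0 < num) : (num >>> (1:Nat)).toNat < num.toNat := by
  have he : num >>> (1:Nat) = num / 2 ^ (1:Nat) := Int.shiftRight_eq_div_pow num 1
  simp at he
  omega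

def pcLoop (num count : Int) : Int :=
  if h : 0 < num then pcLoop (num >>> (1:Nat)) (count + PySem.Int.band num 1) else count
termination_by num.toNat
decreasing_by exact pcLoop_dec num h

-- ===== PORT A =====
def countPairsWithKXor (arr : List Int) (n : Int) (k : Int) : Int :=
  ((PySem.List.pyRange 0 n 1).foldl (fun st i =>
    let num := PySem.Int.bxor (PySem.List.pyGetD arr i 0) k
    let count := pcLoop num 0
    let ans := if st.1.contains count then st.2 + st.1.getD count 0 else st.2
    let freq := if st.1.contains count then st.1 else st.1.insert count 0
    (freq.modify count 0 (· + 1), ans))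
    ((PySem.Dict.empty : PySem.Dict Int Int), 0)).2

-- ===== PORT B =====
-- 'while f < len(s) and s[f] == x: f += 1' — the s[f] access is guarded by f < len(s), so getD is exact
lemma runLenB_dec {n f : Nat} (h : f < n) : n - (f + 1) < n - f := by omega

def runLenB (s : List Int) (x : Int) (f : Nat) : Nat :=
  if h : f < s.length ∧ s.getD f 0 = x then runLenB s x (f + 1) else f
termination_by s.length - f
decreasing_by exact runLenB_dec h.1

lemma runLenB_ge (s : List Int) (x : Int) : ∀ f, f ≤ runLenB s x f := by
  intro f
  induction f using runLenB.induct s x with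
  | case1 f h ih => rw [runLenB, dif_pos h]; omega
  | case2 f h => rw [runLenB, dif_neg h]

lemma pairsB_dec (x : Int) (rest : List Int) :
    ((x :: rest).drop (runLenB (x :: rest) x 1)).length < (x :: rest).length := by
  have h1 : 1 ≤ runLenB (x :: rest) x 1 := runLenB_ge _ _ 1
  simp only [List.length_drop, List.length_cons]
  omega

-- 'def pairs(s): if not s: return 0; x=s[0]; f=<run>; return f*(f-1)//2 + pairs(s[f:])'
-- (s[f:] with 0 ≤ f is List.drop f — exact for a nonnegative Nat index)
def pairsB (s : List Int) : Int :=
  match s with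
  | [] => 0
  | x :: rest =>
    let f := runLenB (x :: rest) x 1
    PySem.Int.floordiv ((f : Int) * ((f : Int) - 1)) 2 + pairsB ((x :: rest).drop f)
termination_by s.length
decreasing_by exact pairsB_dec x rest

def countPairsWithKXor_alt (arr : List Int) (n : Int) (k : Int) : Int :=
  let ps := PySem.List.sorted ((PySem.List.pyRange 0 n 1).map
      (fun i => pcLoop (PySem.Int.bxor (PySem.List.pyGetD arr i 0) k) 0)) (fun x => x) false
  pairsB ps

-- ===== PRECONDITION & SPEC =====
-- Pre_ excludes exactly the inputs where Python A raises IndexError: range(n) reaching past the end of arr.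
def Pre_countPairsWithKXor (arr : List Int) (n : Int) (k : Int) : Prop :=
  n ≤ (arr.length : Int)
instance (arr : List Int) (n : Int) (k : Int) : Decidable (Pre_countPairsWithKXor arr n k) := by
  unfold Pre_countPairsWithKXor; infer_instance
def pvWitness_countPairsWithKXor : List Int × Int × Int := ([3, 5, 6, 3], 4, 2)
def Spec_countPairsWithKXor (arr : List Int) (n : Int) (k : Int) (out : Int) : Prop := out = countPairsWithKXor_alt arr n k
instance (arr : List Int) (n : Int) (k : Int) (out : Int) : Decidable (Spec_countPairsWithKXor arr n k out) := by unfold Spec_countPairsWithKXor; infer_instance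

-- ===== CLAIM (what is proved, stated in full; the proofs are below) =====
def Claim_equal_countPairsWithKXor : Prop := ∀ (arr : List Int) (n : Int) (k : Int), Dom_countPairsWithKXor arr n k → Pre_countPairsWithKXor arr n k → Spec_countPairsWithKXor arr n k (countPairsWithKXor arr n k)

-- ===== LEMMAS AND PROOFS =====

-- C(f,2) as B computes it
def c2 (f : Int) : Int := PySem.Int.floordiv (f * (f - 1)) 2

lemma c2_succ (m : Nat) : c2 ((m : Int) + 1) = c2 (m : Int) + m := by
  unfold c2
  rw [PySem.Int.floordiv_eq_ediv_of_pos (by norm_num),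
      PySem.Int.floordiv_eq_ediv_of_pos (by norm_num)]
  have e : ((m:Int)+1) * ((m:Int)+1-1) = (m:Int)*((m:Int)-1) + 2*m := by ring
  rw [e]
  have h2 : (2 : Int) ∣ (m : Int) * ((m : Int) - 1) := (Int.even_mul_pred_self m).two_dvd
  generalize (m:Int)*((m:Int)-1) = X at *
  omega

-- A's per-element state update, on the count value
def stepA (st : PySem.Dict Int Int × Int) (c : Int) : PySem.Dict Int Int × Int :=
  let ans := if st.1.contains c then st.2 + st.1.getD c 0 else st.2
  let freq := if st.1.contains c then st.1 else st.1.insert c 0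
  (freq.modify c 0 (· + 1), ans)

lemma stepA_eq (d : PySem.Dict Int Int) (a c : Int) :
    stepA (d, a) c = (d.modify c 0 (· + 1), a + d.getD c 0) := by
  unfold stepA
  by_cases h : d.contains c
  · simp [h]
  · simp only [Bool.not_eq_true] at h
    simp [h, PySem.Dict.getD_of_not_contains d 0 h, PySem.Dict.modify,
      PySem.Dict.getD_insert_self, PySem.Dict.insert_insert_self]

-- the dict component of A's fold is the plain counting loop
lemma foldA_fst (cs : List Int) : ∀ (d : PySem.Dict Int Int) (a : Int),
    (cs.foldl stepA (d, a)).1 = cs.foldl (fun d c => d.modify c 0 (· + 1)) d := by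
  induction cs with
  | nil => intro d a; rfl
  | cons c cs ih =>
    intro d a
    simp only [List.foldl_cons, stepA_eq]
    exact ih _ _

-- sum over nodup key list where one key's value shifts by m
lemma sum_map_shift (c m : Int) (f g : Int → Int)
    (hfg : ∀ k, k ≠ c → f k = g k) (hc : f c = g c + m) :
    ∀ (l : List Int), l.Nodup → c ∈ l → (l.map f).sum = (l.map g).sum + m := by
  intro l hnd hmem
  induction l with
  | nil => simp at hmem
  | cons x xs ih =>
    simp only [List.map_cons, List.sum_cons]
    rcases List.mem_cons.mp hmem with h | h
    · subst h
      have : ∀ k ∈ xs, f k = g k := fun k hk =>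
        hfg k (fun he => (List.nodup_cons.mp hnd).1 (he ▸ hk))
      rw [hc, List.map_congr_left this]; ring
    · have hx : x ≠ c := fun he => (List.nodup_cons.mp hnd).1 (he ▸ h)
      rw [hfg x hx, ih (List.nodup_cons.mp hnd).2 h]; ring

lemma count_append_singleton (cs : List Int) (c k : Int) :
    ((cs ++ [c]).count k : Int) = (cs.count k : Int) + (if k = c then 1 else 0) := by
  rw [List.count_append]
  by_cases h : k = c
  · subst h; simp
  · simp [h, Ne.symm h]

lemma ofList_append_singleton (cs : List Int) (c : Int) :
    PySem.Set.ofList (cs ++ [c]) = PySem.Set.add (PySem.Set.ofList cs) c := by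
  rw [PySem.Set.ofList_eq_foldl, PySem.Set.ofList_eq_foldl, List.foldl_append]
  rfl

-- the main identity for A: its running pair count equals the sum of C(count,2) over distinct counts
lemma main_identity (cs : List Int) :
    (cs.foldl stepA ((PySem.Dict.empty : PySem.Dict Int Int), 0)).2
      = ((PySem.Set.ofList cs).map (fun k => c2 ((cs.count k : Nat) : Int))).sum := by
  induction cs using List.reverseRecOn with
  | nil => rfl
  | append_singleton cs c ih =>
    rw [List.foldl_append]
    have hpair : cs.foldl stepA ((PySem.Dict.empty : PySem.Dict Int Int), 0)
        = ((cs.foldl stepA ((PySem.Dict.empty : PySem.Dict Int Int), 0)).1,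
           (cs.foldl stepA ((PySem.Dict.empty : PySem.Dict Int Int), 0)).2) := rfl
    rw [hpair]
    simp only [List.foldl_cons, List.foldl_nil, stepA_eq]
    rw [foldA_fst, ih]
    have hget : (cs.foldl (fun d c => d.modify c 0 (· + 1)) (PySem.Dict.empty : PySem.Dict Int Int)).getD c 0
        = (cs.count c : Int) := by
      rw [PySem.Dict.getD_foldl_modify_add_one]
      simp [PySem.Dict.getD_empty]
    rw [hget, ofList_append_singleton]
    by_cases hc : c ∈ cs
    · have hcontains : (PySem.Set.ofList cs).contains c = true := by
        simp [PySem.Set.mem_ofList, hc]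
      have hshift := sum_map_shift c (cs.count c)
          (fun k => c2 (((cs ++ [c]).count k : Nat) : Int))
          (fun k => c2 ((cs.count k : Nat) : Int))
          (fun k hk => by simp only [count_append_singleton]; simp [hk])
          (by simp only [count_append_singleton]; simp [c2_succ])
          (PySem.Set.ofList cs) (PySem.Set.nodup_ofList cs) ((PySem.Set.mem_ofList cs c).mpr hc)
      rw [PySem.Set.add, if_pos hcontains, hshift]
    · have hcontains : (PySem.Set.ofList cs).contains c = false := by
        simp [PySem.Set.mem_ofList, hc]
      rw [PySem.Set.add, if_neg (by simp [PySem.Set.mem_ofList]; exact hc)]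
      rw [List.map_append, List.sum_append]
      have hcnt0 : ((cs.count c : Nat) : Int) = 0 := by
        simp [List.count_eq_zero_of_not_mem hc]
      have hmap : (PySem.Set.ofList cs).map (fun k => c2 (((cs ++ [c]).count k : Nat) : Int))
          = (PySem.Set.ofList cs).map (fun k => c2 ((cs.count k : Nat) : Int)) := by
        apply List.map_congr_left
        intro k hk
        have hkc : k ≠ c := fun he => hc (he ▸ (PySem.Set.mem_ofList cs k).mp hk)
        rw [count_append_singleton]
        simp [hkc]
      rw [hmap]
      have hone : (cs ++ [c]).count c = 1 := by
        simp [List.count_append, List.count_eq_zero_of_not_mem hc]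
      simp only [List.map_cons, List.map_nil, List.sum_cons, List.sum_nil, hone]
      rw [hcnt0]
      have hz : c2 ((1 : Nat) : Int) = 0 := by decide
      rw [hz]
      ring

-- ====== B side ======

-- sums over two nodup key lists with the same members agree
lemma sum_map_eq_of_nodup_mem (g : Int → Int) (l1 l2 : List Int)
    (h1 : l1.Nodup) (h2 : l2.Nodup) (hm : ∀ a, a ∈ l1 ↔ a ∈ l2) :
    (l1.map g).sum = (l2.map g).sum := by
  have hp : l1.Perm l2 := (List.perm_ext_iff_of_nodup h1 h2).mpr hm
  exact (hp.map g).sum_eq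

-- runLenB counts the run of x's starting at position f
lemma runLenB_eq (s : List Int) (x : Int) : ∀ f,
    runLenB s x f = f + ((s.drop f).takeWhile (fun y => y == x)).length := by
  intro f
  induction f using runLenB.induct s x with
  | case1 f h ih =>
    rw [runLenB, dif_pos h, ih]
    obtain ⟨hf, hx⟩ := h
    have hd : s.drop f = s[f] :: s.drop (f + 1) := List.drop_eq_getElem_cons hf
    have hgx : s[f] = x := by rw [← s.getD_eq_getElem 0 hf]; exact hx
    rw [hd, List.takeWhile_cons, hgx]
    simp
    omega
  | case2 f h =>
    rw [runLenB, dif_neg h]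
    rw [Classical.not_and_iff_not_or_not] at h
    by_cases hf : f < s.length
    · have hx : s.getD f 0 ≠ x := by tauto
      have hd : s.drop f = s[f] :: s.drop (f + 1) := List.drop_eq_getElem_cons hf
      have hgx : s.getD f 0 = s[f] := s.getD_eq_getElem 0 hf
      rw [hd, List.takeWhile_cons]
      rw [hgx] at hx
      simp [hx]
    · rw [List.drop_eq_nil_of_le (by omega)]
      simp

-- after dropping the leading x's, sortedness forces every remaining element above x
lemma dropWhile_gt_of_sorted (x : Int) (l : List Int)
    (hle : ∀ y ∈ l, x ≤ y) (hp : l.Pairwise (· ≤ ·)) :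
    ∀ y ∈ l.dropWhile (fun y => y == x), x < y := by
  induction l with
  | nil => simp
  | cons a l ih =>
    rw [List.dropWhile_cons]
    by_cases ha : (a == x) = true
    · rw [if_pos ha]
      exact ih (fun y hy => hle y (List.mem_cons_of_mem a hy)) ((List.pairwise_cons.mp hp).2)
    · rw [if_neg ha]
      intro y hy
      have hax : x < a := by
        have hne : a ≠ x := by simpa using ha
        exact lt_of_le_of_ne (hle a (by simp)) (Ne.symm hne)
      rcases List.mem_cons.mp hy with rfl | hy'
      · exact hax
      · exact lt_of_lt_of_le hax ((List.pairwise_cons.mp hp).1 y hy')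

-- B's run recursion over a sorted list computes the sum of C(count,2) over distinct values
lemma pairsB_sorted : ∀ (m : Nat) (s : List Int), s.length ≤ m → s.Pairwise (· ≤ ·) →
    pairsB s = (s.dedup.map (fun y => c2 ((s.count y : Nat) : Int))).sum := by
  intro m
  induction m with
  | zero =>
    intro s hm _
    have hnil : s = [] := List.length_eq_zero_iff.mp (by omega)
    subst hnil
    simp [pairsB]
  | succ m ih =>
    intro s hm hs
    match s with
    | [] => simp [pairsB]
    | x :: rest =>
      have hxle : ∀ y ∈ rest, x ≤ y := (List.pairwise_cons.mp hs).1
      have hpw_rest : rest.Pairwise (· ≤ ·) := (List.pairwise_cons.mp hs).2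
      set t := rest.takeWhile (fun y => y == x) with ht
      set d := rest.dropWhile (fun y => y == x) with hd
      have hrest : t ++ d = rest := List.takeWhile_append_dropWhile
      have hrun : runLenB (x :: rest) x 1 = 1 + t.length := by
        rw [runLenB_eq]; rfl
      have htx : ∀ y ∈ t, y = x := by
        intro y hy
        rw [ht] at hy
        simpa using List.mem_takeWhile_imp hy
      have hdx : ∀ y ∈ d, x < y := by
        rw [hd]; exact dropWhile_gt_of_sorted x rest hxle hpw_rest
      have hxnotd : x ∉ d := fun h => lt_irrefl x (hdx x h)
      have hdsorted : d.Pairwise (· ≤ ·) := by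
        rw [hd]; exact List.Pairwise.sublist (List.dropWhile_sublist _) hpw_rest
      have hcount_t : t.count x = t.length :=
        List.count_eq_length.mpr (fun b hb => (htx b hb).symm)
      have hcount_d0 : d.count x = 0 := List.count_eq_zero_of_not_mem hxnotd
      have hcount_s_x : (x :: rest).count x = 1 + t.length := by
        have h1 : (t ++ d).count x = t.length := by
          rw [List.count_append, hcount_t, hcount_d0]
          omega
        rw [← hrest]
        simp only [List.count_cons_self, h1]
        omega
      have hcount_s_k : ∀ y, y ≠ x → (x :: rest).count y = d.count y := by
        intro y hy
        have ht0 : t.count y = 0 :=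
          List.count_eq_zero_of_not_mem (fun hmem => hy (htx y hmem))
        rw [← hrest]
        simp [List.count_cons, List.count_append, ht0]
        exact fun h => hy h.symm
      have hdrop : (x :: rest).drop (1 + t.length) = d := by
        rw [Nat.add_comm, List.drop_succ_cons, ← hrest, List.drop_left]
      have hdlen : d.length ≤ m := by
        have h1 : t.length + d.length = rest.length := by
          rw [← hrest]; simp
        simp only [List.length_cons] at hm
        omega
      have hstep : pairsB (x :: rest)
          = c2 (((1 + t.length : Nat) : Int)) + pairsB ((x :: rest).drop (runLenB (x :: rest) x 1)) := by
        rw [pairsB, hrun]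
        rfl
      rw [hstep, hrun, hdrop, ih d hdlen hdsorted]
      have hmapd : (d.dedup.map (fun y => c2 ((d.count y : Nat) : Int)))
          = (d.dedup.map (fun y => c2 (((x :: rest).count y : Nat) : Int))) := by
        apply List.map_congr_left
        intro y hy
        have hyx : y ≠ x := fun he => hxnotd (he ▸ (List.mem_dedup.mp hy))
        rw [hcount_s_k y hyx]
      rw [hmapd]
      have hxd : (x :: d.dedup).Nodup := by
        rw [List.nodup_cons]
        exact ⟨fun h => hxnotd (List.mem_dedup.mp h), List.nodup_dedup d⟩
      have hsum : c2 (((1 + t.length : Nat) : Int)) +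
          (d.dedup.map (fun y => c2 (((x :: rest).count y : Nat) : Int))).sum
          = ((x :: d.dedup).map (fun y => c2 (((x :: rest).count y : Nat) : Int))).sum := by
        simp [hcount_s_x]
      rw [hsum]
      apply sum_map_eq_of_nodup_mem _ _ _ hxd ((x :: rest).nodup_dedup)
      intro a
      simp only [List.mem_cons, List.mem_dedup]
      constructor
      · rintro (rfl | h)
        · exact Or.inl rfl
        · exact Or.inr (by rw [← hrest]; exact List.mem_append_right t h)
      · rintro (rfl | h)
        · exact Or.inl rfl
        · rw [← hrest] at h
          rcases List.mem_append.mp h with h | h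
          · exact Or.inl (htx a h)
          · exact Or.inr h

theorem ports_agree (arr : List Int) (n k : Int) :
    countPairsWithKXor arr n k = countPairsWithKXor_alt arr n k := by
  have hA : countPairsWithKXor arr n k
      = (((PySem.List.pyRange 0 n 1).map
          (fun i => pcLoop (PySem.Int.bxor (PySem.List.pyGetD arr i 0) k) 0)).foldl stepA
          ((PySem.Dict.empty : PySem.Dict Int Int), 0)).2 := by
    unfold countPairsWithKXor
    rw [List.foldl_map]
    rfl
  have hB : countPairsWithKXor_alt arr n k
      = pairsB (PySem.List.sorted ((PySem.List.pyRange 0 n 1).map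
          (fun i => pcLoop (PySem.Int.bxor (PySem.List.pyGetD arr i 0) k) 0)) (fun x => x) false) := rfl
  rw [hA, hB]
  generalize ((PySem.List.pyRange 0 n 1).map
      (fun i => pcLoop (PySem.Int.bxor (PySem.List.pyGetD arr i 0) k) 0)) = cs
  rw [main_identity]
  have hperm : (PySem.List.sorted cs (fun x => x) false).Perm cs :=
    PySem.List.sorted_perm cs (fun x => x) false
  have hpw : (PySem.List.sorted cs (fun x => x) false).Pairwise (· ≤ ·) := by
    have := PySem.List.sorted_pairwise cs (fun x => x)
    simpa using this
  have hb := pairsB_sorted (PySem.List.sorted cs (fun x => x) false).length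
      (PySem.List.sorted cs (fun x => x) false) (le_refl _) hpw
  rw [hb]
  have hcnt : ((PySem.List.sorted cs (fun x => x) false).dedup.map
        (fun y => c2 (((PySem.List.sorted cs (fun x => x) false).count y : Nat) : Int)))
      = ((PySem.List.sorted cs (fun x => x) false).dedup.map
        (fun y => c2 ((cs.count y : Nat) : Int))) := by
    apply List.map_congr_left
    intro y _
    rw [hperm.count_eq]
  rw [hcnt]
  apply sum_map_eq_of_nodup_mem _ _ _ (PySem.Set.nodup_ofList cs)
    ((PySem.List.sorted cs (fun x => x) false).nodup_dedup)
  intro a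
  rw [PySem.Set.mem_ofList, List.mem_dedup, hperm.mem_iff]

-- ===== VERDICT (by name: the statement is the Claim_ definition above) =====
theorem countPairsWithKXor_spec : Claim_equal_countPairsWithKXor := by
  intro arr n k _ _
  unfold Spec_countPairsWithKXor
  exact ports_agree arr n k
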